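-- pv_equiv track=rewrite | github.com/olsenw/LeetCodeExercises | Python3/modify_graph_edge_weights.py | modifiedGraphEdges
-- ===== SOURCE A (Python) =====
-- import heapq
-- from typing import List, Dict, Set, Optional
--
-- def modifiedGraphEdges(n: int, edges: List[List[int]], source: int, destination: int, target: int) -> List[List[int]]:
--     m = 10**9+7
--     graph = [[] for _ in range(n)]
--     # modified dijkstra using min heap and minimum distance table
--     def dijkstra():
--         distance = [m] * n
--         distance[source] = 0
--         heap = [(0,source)]
--         while heap:
--             x,y = heapq.heappop(heap)
--             if x > distance[y]:
--                 continue
--             for i,j in graph[y]: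
--                 if x + j < distance[i]:
--                     distance[i] = x + j
--                     heapq.heappush(heap, (distance[i], i))
--         return distance[destination]
--     # build graph omitting -1 weight edges
--     for x,y,z in edges:
--         if z != -1:
--             graph[x].append((y,z))
--             graph[y].append((x,z))
--     # find current shortest distance
--     current = dijkstra()
--     # hint 1: if shortest distance is less than target it is impossible
--     # note that dijkstra case of unreachable returns very large value
--     if current < target:
--         return []
--     # update edges if shortest path already equals target
--     if current == target:
--         for i in range(len(edges)):
--             if edges[i][2] == -1:
--                 edges[i][2] = m
--         return edges
--     # iterate over unknown weights
--     for i, (x,y,z) in enumerate(edges):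
--         if z != -1:
--             continue
--         # try setting the weight to one
--         edges[i][2] = 1
--         graph[x].append((y,1))
--         graph[y].append((x,1))
--         # computer updated shortest distance
--         current = dijkstra()
--         # if less than or meeting target update edges
--         if current <= target:
--             edges[i][2] += target - current
--             # set other edges to impossible value
--             for j in range(i + 1, len(edges)):
--                 if edges[j][2] == -1:
--                     edges[j][2] = m
--             return edges
--     # base case
--     return []
-- ===== SOURCE B (Python) =====
-- # B: same outer strategy but the shortest-path routine is Bellman-Ford-style
-- # relaxation-to-fixpoint (no heap, no priority queue), and the result list is
-- # built functionally (no mutation of the caller's edges, unlike A).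
-- def modifiedGraphEdges(n, edges, source, destination, target):
--     m = 10**9 + 7
--     graph = [[] for _ in range(n)]
--     for x, y, z in edges:
--         if z != -1:
--             graph[x].append((y, z))
--             graph[y].append((x, z))
--
--     def spd():
--         # relax every adjacency entry repeatedly until no distance changes
--         distance = [m] * n
--         distance[source] = 0
--         changed = True
--         while changed:
--             changed = False
--             for u in range(n):
--                 du = distance[u]
--                 for v, w in graph[u]:
--                     if du + w < distance[v]:
--                         distance[v] = du + w
--                         changed = True
--         return distance[destination]
--
--     current = spd()
--     if current < target:
--         return []
--     if current == target:
--         return [[r[0], r[1], m if r[2] == -1 else r[2]] for r in edges]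
--     for i, (x, y, z) in enumerate(edges):
--         if z == -1:
--             graph[x].append((y, 1))
--             graph[y].append((x, 1))
--             current = spd()
--             if current <= target:
--                 return [[a, b,
--                          (1 if j < i else
--                           1 + target - current if j == i else
--                           m) if c == -1 else c]
--                         for j, (a, b, c) in enumerate(edges)]
--     return []
-- ===== Notes on version B (the rewrite author's own statement) =====
-- stated objective: alternative
-- what changed: The inner shortest-path routine is reimplemented as Bellman-Ford-style relax-all-edges-until-no-change (no heap, no priority queue) instead of A's lazy-deletion heap Dijkstra, and B builds its result lists with comprehensions instead of mutating the caller's edges list in place.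
-- outside the precondition, e.g. on modifiedGraphEdges(3, [[1, 2, -5]], 0, 2, 4): A returns [], B does not finish within the time limit; on modifiedGraphEdges(2, [[0, -1, -1]], 0, 1, 3): A returns [[0, -1, 3]], B returns [[0, -1, 3]]
import Mathlib
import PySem

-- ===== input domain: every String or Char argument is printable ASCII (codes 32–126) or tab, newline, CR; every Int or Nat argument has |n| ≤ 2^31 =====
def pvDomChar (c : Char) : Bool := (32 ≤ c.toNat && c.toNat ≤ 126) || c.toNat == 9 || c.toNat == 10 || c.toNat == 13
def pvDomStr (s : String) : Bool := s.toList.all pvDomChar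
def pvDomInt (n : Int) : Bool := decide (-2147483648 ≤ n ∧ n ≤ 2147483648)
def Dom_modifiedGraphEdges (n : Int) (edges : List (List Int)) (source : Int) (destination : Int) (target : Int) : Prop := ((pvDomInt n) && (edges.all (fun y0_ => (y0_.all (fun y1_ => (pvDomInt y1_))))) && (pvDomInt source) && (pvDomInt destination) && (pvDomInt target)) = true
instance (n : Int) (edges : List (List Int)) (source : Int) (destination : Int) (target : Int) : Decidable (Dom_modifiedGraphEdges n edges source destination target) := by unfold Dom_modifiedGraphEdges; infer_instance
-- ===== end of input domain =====

-- B replaces A's heap-based Dijkstra by relax-until-fixpoint (Bellman–Ford style) and builds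
-- its result lists functionally; A mutates the caller's `edges` list in place, B does not —
-- the equivalence proved here is about the RETURN value only (objective: alternative).

-- ===== PORT A =====
-- Shared index/graph helpers: both Pythons contain the identical code for these operations.
-- Python list indexing raises on out-of-range and wraps negatives; under Pre_ every runtime
-- index is a valid non-negative index, where `toNat`+`getD`/`set` is exact.
def pvM : Int := 1000000007
def pvGetI (l : List Int) (i : Int) : Int := l.getD i.toNat 0
def pvSetI (l : List Int) (i : Int) (v : Int) : List Int := l.set i.toNat v
def pvGetAdj (g : List (List (Int × Int))) (i : Int) : List (Int × Int) := g.getD i.toNat []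
def pvAppendAdj (g : List (List (Int × Int))) (i : Int) (p : Int × Int) : List (List (Int × Int)) :=
  g.set i.toNat (g.getD i.toNat [] ++ [p])
-- build graph omitting -1 weight edges (identical loop in both Pythons)
def pvBuild (n : Nat) (edges : List (List Int)) : List (List (Int × Int)) :=
  edges.foldl (fun g e =>
    if e.getD 2 0 ≠ -1 then
      pvAppendAdj (pvAppendAdj g (e.getD 0 0) (e.getD 1 0, e.getD 2 0)) (e.getD 1 0) (e.getD 0 0, e.getD 2 0)
    else g) (List.replicate n [])

-- heapq model: the heap is the multiset of pushed-not-yet-popped pairs; heappop returns a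
-- lexicographically least element (equal tuples are identical values, so which copy heapq
-- removes is unobservable) — value-faithful to Python's binary heap.
def pvHeapMin : List (Int × Int) → Option (Int × Int)
  | [] => none
  | p :: t => some (t.foldl (fun a b => if b.1 < a.1 ∨ (b.1 = a.1 ∧ b.2 < a.2) then b else a) p)

def pvRelaxA (x : Int) (st : List Int × List (Int × Int)) (p : Int × Int) : List Int × List (Int × Int) :=
  if x + p.2 < pvGetI st.1 p.1 then (pvSetI st.1 p.1 (x + p.2), st.2 ++ [(x + p.2, p.1)]) else st

-- the `while heap:` loop; fuel only guards totality (proved sufficient below)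
def pvDijkLoopA (g : List (List (Int × Int))) : Nat → List Int → List (Int × Int) → List Int
  | 0, dist, _ => dist
  | fuel + 1, dist, heap =>
    match pvHeapMin heap with
    | none => dist
    | some xy =>
      if xy.1 > pvGetI dist xy.2 then pvDijkLoopA g fuel dist (heap.erase xy)
      else
        let st := (pvGetAdj g xy.2).foldl (pvRelaxA xy.1) (dist, heap.erase xy)
        pvDijkLoopA g fuel st.1 st.2

def pvFuelA (n : Nat) : Nat := 2 * n * 1000000008 + 1

def pvDijkstraA (g : List (List (Int × Int))) (n : Nat) (source destination : Int) : Int :=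
  pvGetI (pvDijkLoopA g (pvFuelA n) (pvSetI (List.replicate n pvM) source 0) [(0, source)]) destination

-- `for j in range(start, len(edges)): if edges[j][2] == -1: edges[j][2] = m`
def pvFillFrom (es : List (List Int)) (j : Nat) : List (List Int) :=
  if h : j < es.length then
    pvFillFrom (if (es.getD j []).getD 2 0 = -1 then es.set j ((es.getD j []).set 2 pvM) else es) (j + 1)
  else es
termination_by es.length - j
decreasing_by split <;> simp_all <;> omega

-- the `for i,(x,y,z) in enumerate(edges)` loop, with A's in-place mutations made explicit
def pvMainA (g : List (List (Int × Int))) (es : List (List Int)) (i : Nat) (n : Nat)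
    (source destination target : Int) : List (List Int) :=
  if h : i < es.length then
    let r := es.getD i []
    if r.getD 2 0 ≠ -1 then pvMainA g es (i + 1) n source destination target
    else
      let es1 := es.set i (r.set 2 1)
      let g1 := pvAppendAdj (pvAppendAdj g (r.getD 0 0) (r.getD 1 0, 1)) (r.getD 1 0) (r.getD 0 0, 1)
      let cur := pvDijkstraA g1 n source destination
      if cur ≤ target then
        pvFillFrom (es1.set i ((es1.getD i []).set 2 (1 + target - cur))) (i + 1)
      else pvMainA g1 es1 (i + 1) n source destination target
  else []
termination_by es.length - i
decreasing_by all_goals simp_all; omega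

def modifiedGraphEdges (n : Int) (edges : List (List Int)) (source : Int) (destination : Int) (target : Int) : List (List Int) :=
  let g := pvBuild n.toNat edges
  let current := pvDijkstraA g n.toNat source destination
  if current < target then []
  else if current = target then pvFillFrom edges 0
  else pvMainA g edges 0 n.toNat source destination target

-- ===== PORT B =====
def pvRelaxB (du : Int) (st : List Int × Bool) (p : Int × Int) : List Int × Bool :=
  if du + p.2 < pvGetI st.1 p.1 then (pvSetI st.1 p.1 (du + p.2), true) else st

-- body of the `for u in range(n)` loop: `du = distance[u]; for v,w in graph[u]: relax`
def pvStepB (g : List (List (Int × Int))) (st : List Int × Bool) (u : Nat) : List Int × Bool :=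
  (pvGetAdj g (u : Int)).foldl (pvRelaxB (pvGetI st.1 (u : Int))) st

-- one full pass over all vertices, with the changed flag
def pvPassB (g : List (List (Int × Int))) (n : Nat) (d : List Int) : List Int × Bool :=
  (List.range n).foldl (pvStepB g) (d, false)

-- `while changed:` — relax to fixpoint; fuel only guards totality (proved sufficient below)
def pvLoopB (g : List (List (Int × Int))) (n : Nat) : Nat → List Int → List Int
  | 0, d => d
  | fuel + 1, d =>
    let st := pvPassB g n d
    if st.2 then pvLoopB g n fuel st.1 else st.1

def pvFuelB (n : Nat) : Nat := n * 1000000008 + 1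

def pvSpdB (g : List (List (Int × Int))) (n : Nat) (source destination : Int) : Int :=
  pvGetI (pvLoopB g n (pvFuelB n) (pvSetI (List.replicate n pvM) source 0)) destination

-- the `current == target` comprehension
def pvOutEq (es : List (List Int)) : List (List Int) :=
  es.map (fun r => [r.getD 0 0, r.getD 1 0, if r.getD 2 0 = -1 then pvM else r.getD 2 0])

-- the success comprehension: tried -1 edges (< i) got weight 1, edge i closes the gap, later -1 edges get m
def pvOutB (es : List (List Int)) (i : Nat) (tc : Int) : List (List Int) :=
  es.mapIdx (fun j r =>
    [r.getD 0 0, r.getD 1 0,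
     if r.getD 2 0 = -1 then (if j < i then 1 else if j = i then tc else pvM) else r.getD 2 0])

def pvMainB (g : List (List (Int × Int))) (es : List (List Int)) (i : Nat) (n : Nat)
    (source destination target : Int) : List (List Int) :=
  if h : i < es.length then
    let r := es.getD i []
    if r.getD 2 0 = -1 then
      let g1 := pvAppendAdj (pvAppendAdj g (r.getD 0 0) (r.getD 1 0, 1)) (r.getD 1 0) (r.getD 0 0, 1)
      let cur := pvSpdB g1 n source destination
      if cur ≤ target then pvOutB es i (1 + target - cur)
      else pvMainB g1 es (i + 1) n source destination target
    else pvMainB g es (i + 1) n source destination target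
  else []
termination_by es.length - i
decreasing_by all_goals omega

def modifiedGraphEdges_alt (n : Int) (edges : List (List Int)) (source : Int) (destination : Int) (target : Int) : List (List Int) :=
  let g := pvBuild n.toNat edges
  let current := pvSpdB g n.toNat source destination
  if current < target then []
  else if current = target then pvOutEq edges
  else pvMainB g edges 0 n.toNat source destination target

-- ===== PRECONDITION & SPEC =====
-- Pre_ restricts to the problem's natural domain (LeetCode 2699): source/destination are valid
-- vertices, every edge row is [x, y, z] with valid vertices and weight -1 or ≥ 0.  Outside it A
-- raises IndexError/ValueError, can loop forever on a negative-weight cycle, or relies on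
-- negative-index wraparound (on which B's return value is not claimed here).
def Pre_modifiedGraphEdges (n : Int) (edges : List (List Int)) (source : Int) (destination : Int) (target : Int) : Prop :=
  0 ≤ source ∧ source < n ∧ 0 ≤ destination ∧ destination < n ∧
  ∀ e ∈ edges, e.length = 3 ∧ 0 ≤ e.getD 0 0 ∧ e.getD 0 0 < n ∧ 0 ≤ e.getD 1 0 ∧ e.getD 1 0 < n ∧
    (e.getD 2 0 = -1 ∨ 0 ≤ e.getD 2 0)
instance (n : Int) (edges : List (List Int)) (source : Int) (destination : Int) (target : Int) : Decidable (Pre_modifiedGraphEdges n edges source destination target) := by unfold Pre_modifiedGraphEdges; infer_instance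

def pvWitness_modifiedGraphEdges : Int × List (List Int) × Int × Int × Int := (2, [[0, 1, -1]], 0, 1, 5)

def Spec_modifiedGraphEdges (n : Int) (edges : List (List Int)) (source : Int) (destination : Int) (target : Int) (out : List (List Int)) : Prop := out = modifiedGraphEdges_alt n edges source destination target
instance (n : Int) (edges : List (List Int)) (source : Int) (destination : Int) (target : Int) (out : List (List Int)) : Decidable (Spec_modifiedGraphEdges n edges source destination target out) := by unfold Spec_modifiedGraphEdges; infer_instance

-- ===== CLAIM (what is proved, stated in full; the proofs are below) =====
def Claim_equal_modifiedGraphEdges : Prop := ∀ (n : Int) (edges : List (List Int)) (source : Int) (destination : Int) (target : Int), Dom_modifiedGraphEdges n edges source destination target → Pre_modifiedGraphEdges n edges source destination target → Spec_modifiedGraphEdges n edges source destination target (modifiedGraphEdges n edges source destination target)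

-- ===== LEMMAS AND PROOFS =====


-- ---- basic list lemmas specialised to this file ----
lemma pvGetD_set {α : Type} (l : List α) (k j : Nat) (v d : α) :
    (l.set k v).getD j d = if k = j ∧ k < l.length then v else l.getD j d := by
  induction l generalizing k j with
  | nil => simp [List.set]
  | cons a t ih =>
    cases k with
    | zero => cases j <;> simp [List.set]
    | succ k' =>
      cases j with
      | zero => simp [List.set]
      | succ j' => simpa [List.set, Nat.succ_lt_succ_iff] using ih k' j'

def pvSumd (l : List Int) : Nat := (l.map Int.toNat).sum

lemma pvSumd_set (l : List Int) (k : Nat) (v : Int) (hk : k < l.length) :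
    pvSumd (l.set k v) + (l.getD k 0).toNat = pvSumd l + v.toNat := by
  induction l generalizing k with
  | nil => simp at hk
  | cons a t ih =>
    cases k with
    | zero => simp [pvSumd]; omega
    | succ k' =>
      have := ih k' (by simpa using hk)
      simp [pvSumd] at this ⊢
      omega

lemma pvSumd_replicate (n : Nat) : pvSumd (List.replicate n pvM) = n * 1000000007 := by
  induction n with
  | zero => simp [pvSumd]
  | succ k ih =>
    simp [pvSumd, List.replicate_succ] at ih ⊢
    simp [pvM]
    omega

-- ---- walks and graph well-formedness ----
inductive pvWalk (g : List (List (Int × Int))) (s : Int) : Int → Int → Prop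
  | base : pvWalk g s s 0
  | step {u c v w} : pvWalk g s u c → (v, w) ∈ g.getD u.toNat [] → pvWalk g s v (c + w)

def pvGoodG (n : Nat) (g : List (List (Int × Int))) : Prop :=
  g.length = n ∧ ∀ u : Nat, u < n → ∀ p ∈ g.getD u [], 0 ≤ p.1 ∧ p.1 < (n : Int) ∧ 0 ≤ p.2

def pvDistOK (n : Nat) (g : List (List (Int × Int))) (s : Int) (d : List Int) : Prop :=
  ∀ k : Nat, k < n → 0 ≤ d.getD k 0 ∧ d.getD k 0 ≤ pvM ∧
    (d.getD k 0 = pvM ∨ pvWalk g s (k : Int) (d.getD k 0))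

def pvHeapOK (n : Nat) (g : List (List (Int × Int))) (s : Int) (d : List Int)
    (h : List (Int × Int)) : Prop :=
  ∀ p ∈ h, 0 ≤ p.1 ∧ 0 ≤ p.2 ∧ p.2 < (n : Int) ∧ d.getD p.2.toNat 0 ≤ p.1 ∧ pvWalk g s p.2 p.1

def pvPrefix (n : Nat) (g : List (List (Int × Int))) (d : List Int) : Prop :=
  ∀ u : Nat, u < n → ∀ p ∈ g.getD u [], d.getD p.1.toNat 0 ≤ d.getD u 0 + p.2

def pvEdgeInv (n : Nat) (g : List (List (Int × Int))) (d : List Int)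
    (h : List (Int × Int)) : Prop :=
  ∀ u : Nat, u < n → ∀ p ∈ g.getD u [], d.getD p.1.toNat 0 ≤ d.getD u 0 + p.2 ∨
    (d.getD u 0, (u : Int)) ∈ h

def pvFinal (n : Nat) (g : List (List (Int × Int))) (s : Int) (d : List Int) : Prop :=
  d.length = n ∧ d.getD s.toNat 0 = 0 ∧ pvDistOK n g s d ∧ pvPrefix n g d

lemma pvWalk_le (n : Nat) (g : List (List (Int × Int))) (s : Int) (d : List Int)
    (hg : pvGoodG n g) (hs0 : 0 ≤ s) (hs : s.toNat < n)
    (hds : d.getD s.toNat 0 = 0) (hp : pvPrefix n g d) :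
    ∀ v c, pvWalk g s v c → 0 ≤ v ∧ v.toNat < n ∧ d.getD v.toNat 0 ≤ c := by
  intro v c hw
  induction hw with
  | base => exact ⟨hs0, hs, by omega⟩
  | @step u c' v' w hw hmem ih =>
    obtain ⟨hu0, hun, hdu⟩ := ih
    obtain ⟨hv0, hvn, hw0⟩ := hg.2 u.toNat hun (v', w) hmem
    refine ⟨hv0, by omega, ?_⟩
    have h2 : d.getD v'.toNat 0 ≤ d.getD u.toNat 0 + w := hp u.toNat hun (v', w) hmem
    omega

lemma pvFinal_unique (n : Nat) (g : List (List (Int × Int))) (s : Int)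
    (hg : pvGoodG n g) (hs0 : 0 ≤ s) (hs : s.toNat < n)
    (d1 d2 : List Int) (h1 : pvFinal n g s d1) (h2 : pvFinal n g s d2) :
    ∀ k : Nat, k < n → d1.getD k 0 = d2.getD k 0 := by
  intro k hk
  have le12 : ∀ (da db : List Int), pvFinal n g s da → pvFinal n g s db →
      da.getD k 0 ≤ db.getD k 0 := by
    intro da db ha hb
    rcases (hb.2.2.1 k hk).2.2 with hm | hw
    · have := (ha.2.2.1 k hk).2.1
      omega
    · have := pvWalk_le n g s da hg hs0 hs ha.2.1 ha.2.2.2 (k : Int) (db.getD k 0) hw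
      simpa using this.2.2
  exact le_antisymm (le12 d1 d2 h1 h2) (le12 d2 d1 h2 h1)


lemma pvRelaxA_fold (n : Nat) (g : List (List (Int × Int))) (s y x : Int)
    (hg : pvGoodG n g) (hwx : pvWalk g s y x) (hx0 : 0 ≤ x) :
    ∀ (l : List (Int × Int)) (d : List Int) (h : List (Int × Int)),
      (∀ p ∈ l, p ∈ g.getD y.toNat []) →
      d.length = n → d.getD s.toNat 0 = 0 → d.getD y.toNat 0 = x →
      pvDistOK n g s d → pvHeapOK n g s d h →
      (∀ u : Nat, u < n → (u : Int) ≠ y → ∀ p ∈ g.getD u [],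
        d.getD p.1.toNat 0 ≤ d.getD u 0 + p.2 ∨ (d.getD u 0, (u : Int)) ∈ h) →
      ((l.foldl (pvRelaxA x) (d, h)).1.length = n ∧
        (l.foldl (pvRelaxA x) (d, h)).1.getD s.toNat 0 = 0 ∧
        (l.foldl (pvRelaxA x) (d, h)).1.getD y.toNat 0 = x ∧
        pvDistOK n g s (l.foldl (pvRelaxA x) (d, h)).1 ∧
        pvHeapOK n g s (l.foldl (pvRelaxA x) (d, h)).1 (l.foldl (pvRelaxA x) (d, h)).2 ∧
        (∀ k : Nat, (l.foldl (pvRelaxA x) (d, h)).1.getD k 0 ≤ d.getD k 0) ∧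
        (∀ p ∈ l, (l.foldl (pvRelaxA x) (d, h)).1.getD p.1.toNat 0 ≤ x + p.2) ∧
        (∀ u : Nat, u < n → (u : Int) ≠ y → ∀ p ∈ g.getD u [],
          (l.foldl (pvRelaxA x) (d, h)).1.getD p.1.toNat 0 ≤
            (l.foldl (pvRelaxA x) (d, h)).1.getD u 0 + p.2 ∨
          ((l.foldl (pvRelaxA x) (d, h)).1.getD u 0, (u : Int)) ∈ (l.foldl (pvRelaxA x) (d, h)).2) ∧
        2 * pvSumd (l.foldl (pvRelaxA x) (d, h)).1 + (l.foldl (pvRelaxA x) (d, h)).2.length ≤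
          2 * pvSumd d + h.length) := by
  intro l
  induction l with
  | nil =>
    intro d h _ hlen hds hdy hdok hhok hgen
    simp only [List.foldl_nil]
    exact ⟨hlen, hds, hdy, hdok, hhok, fun k => le_refl _, by simp, hgen, by omega⟩
  | cons p t ih =>
    intro d h hmem hlen hds hdy hdok hhok hgen
    have hpadj : p ∈ g.getD y.toNat [] := hmem p (by simp)
    have hyn : y.toNat < n := by
      by_contra hc
      have hgl := hg.1
      have : g.getD y.toNat [] = [] := by
        apply List.getD_eq_default
        omega
      rw [this] at hpadj; simp at hpadj
    obtain ⟨hp10, hp1n, hp20⟩ := hg.2 y.toNat hyn p hpadj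
    simp only [List.foldl_cons]
    by_cases hlt : x + p.2 < pvGetI d p.1
    · -- triggered relax
      have step_eq : pvRelaxA x (d, h) p = (d.set p.1.toNat (x + p.2), h ++ [(x + p.2, p.1)]) := by
        simp [pvRelaxA, pvSetI, hlt]
      rw [step_eq]
      have hget : pvGetI d p.1 = d.getD p.1.toNat 0 := rfl
      rw [hget] at hlt
      have hp1nn : p.1.toNat < n := by omega
      have hcast : ((p.1.toNat : Nat) : Int) = p.1 := Int.toNat_of_nonneg hp10
      have hne_s : p.1.toNat ≠ s.toNat := by
        intro hc; rw [hc, hds] at hlt; omega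
      have hne_y : p.1.toNat ≠ y.toNat := by
        intro hc; rw [hc, hdy] at hlt; omega
      have hwalkp : pvWalk g s p.1 (x + p.2) := by
        have : (p.1, p.2) ∈ g.getD y.toNat [] := by simpa using hpadj
        exact pvWalk.step hwx this
      set d' := d.set p.1.toNat (x + p.2) with hd'
      have hgd' : ∀ j : Nat, d'.getD j 0 = if p.1.toNat = j then x + p.2 else d.getD j 0 := by
        intro j
        rw [hd', pvGetD_set]
        by_cases hj : p.1.toNat = j
        · rw [if_pos ⟨hj, by omega⟩, if_pos hj]
        · rw [if_neg (by tauto), if_neg hj]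
      have hmono : ∀ j : Nat, d'.getD j 0 ≤ d.getD j 0 := by
        intro j; rw [hgd']
        by_cases hj : p.1.toNat = j
        · simp [hj] at hlt ⊢; omega
        · simp [hj]
      have hlen' : d'.length = n := by rw [hd']; simpa using hlen
      have hds' : d'.getD s.toNat 0 = 0 := by rw [hgd', if_neg hne_s]; exact hds
      have hdy' : d'.getD y.toNat 0 = x := by rw [hgd', if_neg hne_y]; exact hdy
      have hdok' : pvDistOK n g s d' := by
        intro k hk
        rw [hgd']
        by_cases hj : p.1.toNat = k
        · rw [if_pos hj]
          obtain ⟨b1, b2, _⟩ := hdok p.1.toNat hp1nn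
          refine ⟨by omega, by omega, Or.inr ?_⟩
          have hck : ((k : Nat) : Int) = p.1 := by rw [← hj]; exact hcast
          rw [hck]
          exact hwalkp
        · rw [if_neg hj]
          exact hdok k hk
      have hhok' : pvHeapOK n g s d' (h ++ [(x + p.2, p.1)]) := by
        intro q hq
        simp only [List.mem_append, List.mem_singleton] at hq
        rcases hq with hq | hq
        · obtain ⟨a1, a2, a3, a4, a5⟩ := hhok q hq
          exact ⟨a1, a2, a3, le_trans (hmono _) a4, a5⟩
        · subst hq
          refine ⟨by omega, hp10, hp1n, ?_, hwalkp⟩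
          show d'.getD p.1.toNat 0 ≤ x + p.2
          rw [hgd' p.1.toNat, if_pos rfl]
      have hgen' : ∀ u : Nat, u < n → (u : Int) ≠ y → ∀ q ∈ g.getD u [],
          d'.getD q.1.toNat 0 ≤ d'.getD u 0 + q.2 ∨
          (d'.getD u 0, (u : Int)) ∈ h ++ [(x + p.2, p.1)] := by
        intro u hu hune q hqadj
        by_cases hup : p.1.toNat = u
        · right
          rw [hgd', if_pos hup]
          simp only [List.mem_append, List.mem_singleton]
          right
          rw [← hup, hcast]
        · rcases hgen u hu hune q hqadj with hle | hin
          · left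
            rw [hgd' u, if_neg hup, hgd' q.1.toNat]
            by_cases hq1 : p.1.toNat = q.1.toNat
            · rw [if_pos hq1]
              have hlt' : x + p.2 < d.getD q.1.toNat 0 := by rw [← hq1]; exact hlt
              omega
            · rw [if_neg hq1]
              exact hle
          · right
            rw [hgd' u, if_neg hup]
            simp only [List.mem_append]
            exact Or.inl hin
      have hsum : 2 * pvSumd d' + (h ++ [(x + p.2, p.1)]).length + 1 ≤ 2 * pvSumd d + h.length := by
        have hset := pvSumd_set d p.1.toNat (x + p.2) (by omega)
        simp only [List.length_append, List.length_singleton]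
        obtain ⟨b1, b2, _⟩ := hdok p.1.toNat hp1nn
        rw [hd']
        omega
      obtain ⟨c1, c2, c3, c4, c5, c6, c7, c8, c9⟩ :=
        ih d' (h ++ [(x + p.2, p.1)]) (fun q hq => hmem q (List.mem_cons_of_mem p hq)) hlen' hds' hdy' hdok' hhok' hgen'
      refine ⟨c1, c2, c3, c4, c5, fun k => le_trans (c6 k) (hmono k), ?_, c8, by omega⟩
      intro q hq
      simp only [List.mem_cons] at hq
      rcases hq with hq | hq
      · rw [hq]
        calc (t.foldl (pvRelaxA x) (d', h ++ [(x + p.2, p.1)])).1.getD p.1.toNat 0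
            ≤ d'.getD p.1.toNat 0 := c6 _
          _ = x + p.2 := by rw [hgd', if_pos rfl]
      · exact c7 q hq
    · -- no relax
      have step_eq : pvRelaxA x (d, h) p = (d, h) := by
        simp only [pvRelaxA, if_neg hlt]
      rw [step_eq]
      obtain ⟨c1, c2, c3, c4, c5, c6, c7, c8, c9⟩ :=
        ih d h (fun q hq => hmem q (List.mem_cons_of_mem p hq)) hlen hds hdy hdok hhok hgen
      refine ⟨c1, c2, c3, c4, c5, c6, ?_, c8, c9⟩
      intro q hq
      simp only [List.mem_cons] at hq
      rcases hq with hq | hq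
      · subst hq
        have : d.getD q.1.toNat 0 ≤ x + q.2 := by
          have : ¬ (x + q.2 < d.getD q.1.toNat 0) := hlt
          omega
        exact le_trans (c6 _) this
      · exact c7 q hq


lemma pvHeapMin_mem (h : List (Int × Int)) (p : Int × Int) (hmin : pvHeapMin h = some p) :
    p ∈ h := by
  cases h with
  | nil => simp [pvHeapMin] at hmin
  | cons a t =>
    simp only [pvHeapMin, Option.some.injEq] at hmin
    have key : ∀ (l : List (Int × Int)) (a : Int × Int),
        l.foldl (fun a b => if b.1 < a.1 ∨ (b.1 = a.1 ∧ b.2 < a.2) then b else a) a ∈ a :: l := by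
      intro l
      induction l with
      | nil => simp
      | cons b t' ih =>
        intro a0
        simp only [List.foldl_cons]
        have := ih (if b.1 < a0.1 ∨ (b.1 = a0.1 ∧ b.2 < a0.2) then b else a0)
        rcases List.mem_cons.1 this with hc | hc
        · rw [hc]
          split <;> simp
        · simp [hc]
    rw [← hmin]
    exact key t a

lemma pvDijkA_loop (n : Nat) (g : List (List (Int × Int))) (s : Int)
    (hg : pvGoodG n g) :
    ∀ (fuel : Nat) (d : List Int) (h : List (Int × Int)),
      d.length = n → d.getD s.toNat 0 = 0 → pvDistOK n g s d → pvHeapOK n g s d h →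
      pvEdgeInv n g d h → 2 * pvSumd d + h.length < fuel →
      pvFinal n g s (pvDijkLoopA g fuel d h) := by
  intro fuel
  induction fuel with
  | zero => intro d h _ _ _ _ _ hf; omega
  | succ f ih =>
    intro d h hlen hds hdok hhok hedge hf
    cases hmin : pvHeapMin h with
    | none =>
      have hnil : h = [] := by
        cases h with
        | nil => rfl
        | cons a t => simp [pvHeapMin] at hmin
      simp only [pvDijkLoopA, hmin]
      refine ⟨hlen, hds, hdok, ?_⟩
      intro u hu p hp
      rcases hedge u hu p hp with hle | hin
      · exact hle
      · rw [hnil] at hin; simp at hin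
    | some xy =>
      have hmem := pvHeapMin_mem h xy hmin
      obtain ⟨hx0, hy0, hyn, hdyx, hwxy⟩ := hhok xy hmem
      have hynn : xy.2.toNat < n := by omega
      have herlen : (h.erase xy).length = h.length - 1 := List.length_erase_of_mem hmem
      have hhok' : pvHeapOK n g s d (h.erase xy) := fun q hq => hhok q (List.mem_of_mem_erase hq)
      have hgi : pvGetI d xy.2 = d.getD xy.2.toNat 0 := rfl
      have hpos : 0 < h.length := List.length_pos_of_mem hmem
      by_cases hgt : xy.1 > pvGetI d xy.2
      · simp only [pvDijkLoopA, hmin, if_pos hgt]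
        refine ih d (h.erase xy) hlen hds hdok hhok' ?_ (by omega)
        intro u hu p hp
        rcases hedge u hu p hp with hle | hin
        · exact Or.inl hle
        · have hne : (d.getD u 0, (u : Int)) ≠ xy := by
            intro hc
            have h2 : (u : Int) = xy.2 := congrArg Prod.snd hc
            have h1 : d.getD u 0 = xy.1 := congrArg Prod.fst hc
            have hu2 : u = xy.2.toNat := by omega
            rw [hgi, ← hu2, h1] at hgt
            omega
          exact Or.inr ((List.mem_erase_of_ne hne).mpr hin)
      · simp only [pvDijkLoopA, hmin, if_neg hgt]
        have hxeq : d.getD xy.2.toNat 0 = xy.1 := by rw [hgi] at hgt; omega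
        have hgen : ∀ u : Nat, u < n → (u : Int) ≠ xy.2 → ∀ p ∈ g.getD u [],
            d.getD p.1.toNat 0 ≤ d.getD u 0 + p.2 ∨ (d.getD u 0, (u : Int)) ∈ h.erase xy := by
          intro u hu hune p hp
          rcases hedge u hu p hp with hle | hin
          · exact Or.inl hle
          · refine Or.inr ((List.mem_erase_of_ne ?_).mpr hin)
            intro hc
            exact hune (congrArg Prod.snd hc)
        obtain ⟨c1, c2, c3, c4, c5, c6, c7, c8, c9⟩ :=
          pvRelaxA_fold n g s xy.2 xy.1 hg hwxy hx0 (pvGetAdj g xy.2) d (h.erase xy)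
            (fun q hq => hq) hlen hds hxeq hdok hhok' hgen
        refine ih _ _ c1 c2 c4 c5 ?_ (by omega)
        intro u hu p hp
        by_cases huy : (u : Int) = xy.2
        · have hun : u = xy.2.toNat := by omega
          left
          rw [hun] at hp
          have := c7 p hp
          rw [hun, c3]
          exact this
        · exact c8 u hu huy p hp


lemma pvRelaxB_fold (n : Nat) (g : List (List (Int × Int))) (s : Int) (u : Nat) (du : Int)
    (hg : pvGoodG n g) (hu : u < n) (hdu0 : 0 ≤ du) (hduR : du = pvM ∨ pvWalk g s (u : Int) du) :
    ∀ (l : List (Int × Int)) (d : List Int) (b : Bool),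
      (∀ p ∈ l, p ∈ g.getD u []) →
      d.length = n → d.getD s.toNat 0 = 0 → pvDistOK n g s d →
      ((l.foldl (pvRelaxB du) (d, b)).1.length = n ∧
        (l.foldl (pvRelaxB du) (d, b)).1.getD s.toNat 0 = 0 ∧
        pvDistOK n g s (l.foldl (pvRelaxB du) (d, b)).1 ∧
        pvSumd (l.foldl (pvRelaxB du) (d, b)).1 ≤ pvSumd d ∧
        ((l.foldl (pvRelaxB du) (d, b)).2 = b ∧ (l.foldl (pvRelaxB du) (d, b)).1 = d ∨
          pvSumd (l.foldl (pvRelaxB du) (d, b)).1 < pvSumd d ∧ (l.foldl (pvRelaxB du) (d, b)).2 = true)) := by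
  intro l
  induction l with
  | nil =>
    intro d b _ hlen hds hdok
    exact ⟨hlen, hds, hdok, le_refl _, Or.inl ⟨rfl, rfl⟩⟩
  | cons p t ih =>
    intro d b hmem hlen hds hdok
    have hpadj : p ∈ g.getD u [] := hmem p (by simp)
    obtain ⟨hp10, hp1n, hp20⟩ := hg.2 u hu p hpadj
    simp only [List.foldl_cons]
    by_cases hlt : du + p.2 < pvGetI d p.1
    · have hget : pvGetI d p.1 = d.getD p.1.toNat 0 := rfl
      rw [hget] at hlt
      have hp1nn : p.1.toNat < n := by omega
      have hwu : pvWalk g s (u : Int) du := by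
        rcases hduR with hm | hw
        · exfalso
          obtain ⟨b1, b2, _⟩ := hdok p.1.toNat hp1nn
          omega
        · exact hw
      have hwalkp : pvWalk g s p.1 (du + p.2) := by
        have hmem2 : (p.1, p.2) ∈ g.getD ((u : Int)).toNat [] := by simpa using hpadj
        exact pvWalk.step hwu hmem2
      have step_eq : pvRelaxB du (d, b) p = (d.set p.1.toNat (du + p.2), true) := by
        unfold pvRelaxB
        rw [if_pos (show du + p.2 < pvGetI (d, b).1 p.1 from hlt)]
        rfl
      rw [step_eq]
      set d' := d.set p.1.toNat (du + p.2) with hd'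
      have hgd' : ∀ j : Nat, d'.getD j 0 = if p.1.toNat = j then du + p.2 else d.getD j 0 := by
        intro j
        rw [hd', pvGetD_set]
        by_cases hj : p.1.toNat = j
        · rw [if_pos ⟨hj, by omega⟩, if_pos hj]
        · rw [if_neg (by tauto), if_neg hj]
      have hne_s : p.1.toNat ≠ s.toNat := by
        intro hc; rw [hc, hds] at hlt; omega
      have hlen' : d'.length = n := by rw [hd']; simpa using hlen
      have hds' : d'.getD s.toNat 0 = 0 := by rw [hgd', if_neg hne_s]; exact hds
      have hdok' : pvDistOK n g s d' := by
        intro k hk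
        rw [hgd']
        by_cases hj : p.1.toNat = k
        · rw [if_pos hj]
          obtain ⟨b1, b2, _⟩ := hdok p.1.toNat hp1nn
          refine ⟨by omega, by omega, Or.inr ?_⟩
          have hck : ((k : Nat) : Int) = p.1 := by rw [← hj]; exact Int.toNat_of_nonneg hp10
          rw [hck]
          exact hwalkp
        · rw [if_neg hj]
          exact hdok k hk
      have hsum : pvSumd d' < pvSumd d := by
        have hset := pvSumd_set d p.1.toNat (du + p.2) (by omega)
        obtain ⟨b1, _, _⟩ := hdok p.1.toNat hp1nn
        rw [hd']
        omega
      obtain ⟨c1, c2, c3, c4, c5⟩ :=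
        ih d' true (fun q hq => hmem q (List.mem_cons_of_mem p hq)) hlen' hds' hdok'
      refine ⟨c1, c2, c3, by omega, Or.inr ⟨?_, ?_⟩⟩
      · omega
      · rcases c5 with ⟨h1, _⟩ | ⟨_, h2⟩
        · exact h1
        · exact h2
    · have step_eq : pvRelaxB du (d, b) p = (d, b) := by
        simp only [pvRelaxB, if_neg hlt]
      rw [step_eq]
      exact ih d b (fun q hq => hmem q (List.mem_cons_of_mem p hq)) hlen hds hdok

lemma pvPassB_inv (n : Nat) (g : List (List (Int × Int))) (s : Int)
    (hg : pvGoodG n g) :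
    ∀ (l : List Nat) (d : List Int) (b : Bool),
      (∀ u ∈ l, u < n) →
      d.length = n → d.getD s.toNat 0 = 0 → pvDistOK n g s d →
      ((l.foldl (pvStepB g) (d, b)).1.length = n ∧
        (l.foldl (pvStepB g) (d, b)).1.getD s.toNat 0 = 0 ∧
        pvDistOK n g s (l.foldl (pvStepB g) (d, b)).1 ∧
        pvSumd (l.foldl (pvStepB g) (d, b)).1 ≤ pvSumd d ∧
        ((l.foldl (pvStepB g) (d, b)).2 = b ∧
            (l.foldl (pvStepB g) (d, b)).1 = d ∨
          pvSumd (l.foldl (pvStepB g) (d, b)).1 < pvSumd d ∧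
            (l.foldl (pvStepB g) (d, b)).2 = true)) := by
  intro l
  induction l with
  | nil =>
    intro d b _ hlen hds hdok
    exact ⟨hlen, hds, hdok, le_refl _, Or.inl ⟨rfl, rfl⟩⟩
  | cons u t ih =>
    intro d b hmem hlen hds hdok
    have hu : u < n := hmem u (by simp)
    simp only [List.foldl_cons, pvStepB]
    have hdu0 : 0 ≤ pvGetI d (u : Int) := (hdok u hu).1
    have hduR : pvGetI d (u : Int) = pvM ∨ pvWalk g s (u : Int) (pvGetI d (u : Int)) := (hdok u hu).2.2
    obtain ⟨c1, c2, c3, c4, c5⟩ :=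
      pvRelaxB_fold n g s u (pvGetI d (u : Int)) hg hu hdu0 hduR (pvGetAdj g (u : Int)) d b
        (fun q hq => hq) hlen hds hdok
    obtain ⟨e1, e2, e3, e4, e5⟩ :=
      ih ((pvGetAdj g (u : Int)).foldl (pvRelaxB (pvGetI d (u : Int))) (d, b)).1
        ((pvGetAdj g (u : Int)).foldl (pvRelaxB (pvGetI d (u : Int))) (d, b)).2
        (fun q hq => hmem q (List.mem_cons_of_mem u hq)) c1 c2 c3
    simp only [Prod.mk.eta] at e1 e2 e3 e4 e5
    refine ⟨e1, e2, e3, by omega, ?_⟩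
    rcases c5 with ⟨f1, f2⟩ | ⟨f1, f2⟩
    · rcases e5 with ⟨e6, e7⟩ | ⟨e6, e7⟩
      · exact Or.inl ⟨by rw [e6, f1], by rw [e7, f2]⟩
      · exact Or.inr ⟨by omega, e7⟩
    · rcases e5 with ⟨e6, e7⟩ | ⟨e6, e7⟩
      · exact Or.inr ⟨by omega, by rw [e6, f2]⟩
      · exact Or.inr ⟨by omega, e7⟩

lemma pvRelaxB_mono (x : Int) :
    ∀ (l : List (Int × Int)) (st : List Int × Bool), st.2 = true →
      (l.foldl (pvRelaxB x) st).2 = true := by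
  intro l
  induction l with
  | nil => intro st h; exact h
  | cons p t ih =>
    intro st h
    simp only [List.foldl_cons]
    apply ih
    simp only [pvRelaxB]
    split
    · rfl
    · exact h

lemma pvPassB_mono (g : List (List (Int × Int))) :
    ∀ (l : List Nat) (st : List Int × Bool), st.2 = true →
      (l.foldl (pvStepB g) st).2 = true := by
  intro l
  induction l with
  | nil => intro st h; exact h
  | cons u t ih =>
    intro st h
    simp only [List.foldl_cons, pvStepB]
    exact ih _ (pvRelaxB_mono _ _ _ h)

lemma pvRelaxB_fix (x : Int) :
    ∀ (l : List (Int × Int)) (d : List Int),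
      (l.foldl (pvRelaxB x) (d, false)).2 = false →
      (l.foldl (pvRelaxB x) (d, false)).1 = d ∧ ∀ p ∈ l, d.getD p.1.toNat 0 ≤ x + p.2 := by
  intro l
  induction l with
  | nil => intro d _; simp
  | cons p t ih =>
    intro d hfix
    simp only [List.foldl_cons] at hfix ⊢
    by_cases hlt : x + p.2 < pvGetI d p.1
    · exfalso
      have : pvRelaxB x (d, false) p = (pvSetI d p.1 (x + p.2), true) := by
        simp [pvRelaxB, hlt]
      rw [this] at hfix
      rw [pvRelaxB_mono x t _ rfl] at hfix
      simp at hfix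
    · have hstep : pvRelaxB x (d, false) p = (d, false) := by
        simp only [pvRelaxB, if_neg hlt]
      rw [hstep] at hfix ⊢
      obtain ⟨i1, i2⟩ := ih d hfix
      refine ⟨i1, ?_⟩
      intro q hq
      rcases List.mem_cons.1 hq with hc | hc
      · rw [hc]
        have : ¬ (x + p.2 < d.getD p.1.toNat 0) := hlt
        omega
      · exact i2 q hc

lemma pvPassB_fix (g : List (List (Int × Int))) :
    ∀ (l : List Nat) (d : List Int),
      (l.foldl (pvStepB g) (d, false)).2 = false →
      (l.foldl (pvStepB g) (d, false)).1 = d ∧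
        ∀ u ∈ l, ∀ p ∈ g.getD u [], d.getD p.1.toNat 0 ≤ d.getD u 0 + p.2 := by
  intro l
  induction l with
  | nil => intro d _; simp
  | cons u t ih =>
    intro d hfix
    simp only [List.foldl_cons, pvStepB] at hfix ⊢
    cases hst : ((pvGetAdj g (u : Int)).foldl (pvRelaxB (pvGetI d (u : Int))) (d, false)).2 with
    | true =>
      exfalso
      have hpair : ((pvGetAdj g (u : Int)).foldl (pvRelaxB (pvGetI d (u : Int))) (d, false)) =
          (((pvGetAdj g (u : Int)).foldl (pvRelaxB (pvGetI d (u : Int))) (d, false)).1, true) := by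
        rw [← hst]
      rw [hpair, pvPassB_mono g t _ rfl] at hfix
      simp at hfix
    | false =>
      obtain ⟨i1, i2⟩ := pvRelaxB_fix (pvGetI d (u : Int)) (pvGetAdj g (u : Int)) d hst
      have hpair : ((pvGetAdj g (u : Int)).foldl (pvRelaxB (pvGetI d (u : Int))) (d, false)) = ((d, false) : List Int × Bool) :=
        Prod.ext_iff.mpr ⟨i1, hst⟩
      rw [hpair] at hfix ⊢
      obtain ⟨j1, j2⟩ := ih d hfix
      refine ⟨j1, ?_⟩
      intro v hv p hp
      rcases List.mem_cons.1 hv with hc | hc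
      · subst hc
        exact i2 p hp
      · exact j2 v hc p hp

lemma pvLoopB_final (n : Nat) (g : List (List (Int × Int))) (s : Int)
    (hg : pvGoodG n g) :
    ∀ (fuel : Nat) (d : List Int),
      d.length = n → d.getD s.toNat 0 = 0 → pvDistOK n g s d → pvSumd d < fuel →
      pvFinal n g s (pvLoopB g n fuel d) := by
  intro fuel
  induction fuel with
  | zero => intro d _ _ _ hf; omega
  | succ f ih =>
    intro d hlen hds hdok hf
    rw [pvLoopB]
    obtain ⟨c1, c2, c3, c4, c5⟩ :=
      pvPassB_inv n g s hg (List.range n) d false (fun u hu => List.mem_range.1 hu) hlen hds hdok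
    show pvFinal n g s (if (pvPassB g n d).2 then pvLoopB g n f (pvPassB g n d).1 else (pvPassB g n d).1)
    cases hst : (pvPassB g n d).2 with
    | true =>
      rw [if_pos rfl]
      apply ih _ c1 c2 c3
      rcases c5 with ⟨f1, _⟩ | ⟨f1, _⟩
      · rw [pvPassB] at hst; rw [f1] at hst; simp at hst
      · rw [pvPassB] at *; omega
    | false =>
      rw [if_neg (by simp)]
      have hfix := pvPassB_fix g (List.range n) d (by rw [pvPassB] at hst; exact hst)
      obtain ⟨i1, i2⟩ := hfix
      have hres : (pvPassB g n d).1 = d := by rw [pvPassB]; exact i1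
      rw [hres]
      refine ⟨hlen, hds, hdok, ?_⟩
      intro u hu p hp
      exact i2 u (List.mem_range.2 hu) p hp


lemma pvInit_getD (n : Nat) (s : Int) (hs : s.toNat < n) (j : Nat) :
    (pvSetI (List.replicate n pvM) s 0).getD j 0 =
      if s.toNat = j then 0 else if j < n then pvM else 0 := by
  unfold pvSetI
  rw [pvGetD_set]
  simp only [List.length_replicate]
  by_cases h1 : s.toNat = j
  · rw [if_pos ⟨h1, hs⟩, if_pos h1]
  · rw [if_neg (by tauto), if_neg h1]
    by_cases h2 : j < n
    · rw [if_pos h2]; exact List.getD_replicate pvM h2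
    · rw [if_neg h2]
      rw [List.getD_eq_default]
      simpa using h2

lemma pvM_toNat : pvM.toNat = 1000000007 := rfl

lemma pvSum_init (n : Nat) (s : Int) (hs : s.toNat < n) :
    pvSumd (pvSetI (List.replicate n pvM) s 0) + 1000000007 = n * 1000000007 := by
  have hset := pvSumd_set (List.replicate n pvM) s.toNat 0 (by simpa using hs)
  have hrep : (List.replicate n pvM).getD s.toNat 0 = pvM := List.getD_replicate pvM hs
  rw [hrep, pvSumd_replicate, pvM_toNat] at hset
  simp only [Int.toNat_zero, Nat.add_zero] at hset
  unfold pvSetI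
  exact hset

lemma pvDijkstra_eq (n : Nat) (g : List (List (Int × Int))) (s t : Int)
    (hg : pvGoodG n g) (hs0 : 0 ≤ s) (hs : s.toNat < n) (ht : t.toNat < n) :
    pvDijkstraA g n s t = pvSpdB g n s t := by
  have hcast : ((s.toNat : Nat) : Int) = s := Int.toNat_of_nonneg hs0
  have hlen : (pvSetI (List.replicate n pvM) s 0).length = n := by
    unfold pvSetI; simp
  have hds : (pvSetI (List.replicate n pvM) s 0).getD s.toNat 0 = 0 := by
    rw [pvInit_getD n s hs, if_pos rfl]
  have hdok : pvDistOK n g s (pvSetI (List.replicate n pvM) s 0) := by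
    intro k hk
    rw [pvInit_getD n s hs]
    by_cases h1 : s.toNat = k
    · rw [if_pos h1]
      refine ⟨le_refl _, by norm_num [pvM], Or.inr ?_⟩
      have : ((k : Nat) : Int) = s := by rw [← h1]; exact hcast
      rw [this]
      exact pvWalk.base
    · rw [if_neg h1, if_pos hk]
      exact ⟨by norm_num [pvM], le_refl _, Or.inl rfl⟩
  have hbound : ∀ j : Nat, 0 ≤ (pvSetI (List.replicate n pvM) s 0).getD j 0 ∧
      (pvSetI (List.replicate n pvM) s 0).getD j 0 ≤ pvM := by
    intro j
    rw [pvInit_getD n s hs]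
    split
    · exact ⟨le_refl _, by norm_num [pvM]⟩
    · split
      · exact ⟨by norm_num [pvM], le_refl _⟩
      · exact ⟨le_refl _, by norm_num [pvM]⟩
  have hhok : pvHeapOK n g s (pvSetI (List.replicate n pvM) s 0) [(0, s)] := by
    intro p hp
    simp only [List.mem_singleton] at hp
    subst hp
    exact ⟨le_refl _, hs0, by omega, by rw [hds], pvWalk.base⟩
  have hedge : pvEdgeInv n g (pvSetI (List.replicate n pvM) s 0) [(0, s)] := by
    intro u hu p hp
    by_cases h1 : s.toNat = u
    · right
      have h2 : (pvSetI (List.replicate n pvM) s 0).getD u 0 = 0 := by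
        rw [← h1]; exact hds
      rw [h2]
      have h3 : ((u : Nat) : Int) = s := by rw [← h1]; exact hcast
      rw [h3]
      simp
    · left
      obtain ⟨_, _, hw0⟩ := hg.2 u hu p hp
      have h2 : (pvSetI (List.replicate n pvM) s 0).getD u 0 = pvM := by
        rw [pvInit_getD n s hs, if_neg h1, if_pos hu]
      rw [h2]
      have := (hbound p.1.toNat).2
      omega
  have hsum := pvSum_init n s hs
  have hA : pvFinal n g s (pvDijkLoopA g (pvFuelA n) (pvSetI (List.replicate n pvM) s 0) [(0, s)]) := by
    apply pvDijkA_loop n g s hg _ _ _ hlen hds hdok hhok hedge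
    unfold pvFuelA
    simp only [List.length_singleton]
    omega
  have hB : pvFinal n g s (pvLoopB g n (pvFuelB n) (pvSetI (List.replicate n pvM) s 0)) := by
    apply pvLoopB_final n g s hg _ _ hlen hds hdok
    unfold pvFuelB
    omega
  have := pvFinal_unique n g s hg hs0 hs _ _ hA hB t.toNat ht
  exact this


-- ---- graph construction is well-formed ----
lemma pvAppendAdj_good (n : Nat) (g : List (List (Int × Int))) (x : Int) (p : Int × Int)
    (hg : pvGoodG n g) (h1 : 0 ≤ p.1) (h2 : p.1 < (n : Int)) (h3 : 0 ≤ p.2) :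
    pvGoodG n (pvAppendAdj g x p) := by
  refine ⟨by unfold pvAppendAdj; simp [hg.1], ?_⟩
  intro u hu q hq
  unfold pvAppendAdj at hq
  rw [pvGetD_set] at hq
  by_cases hc : x.toNat = u ∧ x.toNat < g.length
  · rw [if_pos hc] at hq
    rcases List.mem_append.1 hq with hq | hq
    · exact hg.2 u hu q (by rw [← hc.1]; exact hq)
    · rcases List.mem_singleton.1 hq with rfl
      exact ⟨h1, h2, h3⟩
  · rw [if_neg hc] at hq
    exact hg.2 u hu q hq

def pvRowOK (n : Nat) (e : List Int) : Prop :=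
  e.length = 3 ∧ 0 ≤ e.getD 0 0 ∧ e.getD 0 0 < (n : Int) ∧ 0 ≤ e.getD 1 0 ∧
    e.getD 1 0 < (n : Int) ∧ (e.getD 2 0 = -1 ∨ 0 ≤ e.getD 2 0)

lemma pvBuild_good (n : Nat) :
    ∀ (es : List (List Int)) (g : List (List (Int × Int))),
      (∀ e ∈ es, pvRowOK n e) → pvGoodG n g →
      pvGoodG n (es.foldl (fun g e =>
        if e.getD 2 0 ≠ -1 then
          pvAppendAdj (pvAppendAdj g (e.getD 0 0) (e.getD 1 0, e.getD 2 0)) (e.getD 1 0) (e.getD 0 0, e.getD 2 0)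
        else g) g) := by
  intro es
  induction es with
  | nil => intro g _ hg; exact hg
  | cons e t ih =>
    intro g hrows hg
    simp only [List.foldl_cons]
    apply ih _ (fun e' he' => hrows e' (List.mem_cons_of_mem e he'))
    obtain ⟨_, h1, h2, h3, h4, h5⟩ := hrows e (by simp)
    by_cases hz : e.getD 2 0 ≠ -1
    · rw [if_pos hz]
      have hz0 : 0 ≤ e.getD 2 0 := by
        rcases h5 with h5 | h5
        · exact absurd h5 hz
        · exact h5
      exact pvAppendAdj_good n _ _ _ (pvAppendAdj_good n _ _ _ hg h3 h4 hz0) h1 h2 hz0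
    · rw [if_neg hz]
      exact hg

lemma pvGoodG_replicate (n : Nat) : pvGoodG n (List.replicate n ([] : List (Int × Int))) := by
  refine ⟨by simp, ?_⟩
  intro u hu p hp
  rw [List.getD_replicate _ hu] at hp
  simp at hp

-- ---- the edge-list transforms ----
def pvOnes (es : List (List Int)) (i : Nat) : List (List Int) :=
  es.mapIdx (fun j r => if j < i ∧ r.getD 2 0 = -1 then r.set 2 1 else r)

def pvFillSpec (es : List (List Int)) (j : Nat) : List (List Int) :=
  es.mapIdx (fun k r => if j ≤ k ∧ r.getD 2 0 = -1 then r.set 2 pvM else r)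

lemma pvGetD_mapIdx (es : List (List Int)) (f : Nat → List Int → List Int) (j : Nat)
    (hj : j < es.length) : (es.mapIdx f).getD j [] = f j (es.getD j []) := by
  rw [List.getD_eq_getElem _ _ (by simpa using hj), List.getElem_mapIdx,
    List.getD_eq_getElem _ _ hj]

lemma pvMapIdx_id (es : List (List Int)) (f : Nat → List Int → List Int)
    (hf : ∀ j r, j < es.length → f j r = r) : es.mapIdx f = es := by
  apply List.ext_getElem (by simp)
  intro j h1 h2
  rw [List.getElem_mapIdx]
  exact hf j _ h2

lemma pvOnes_zero (es : List (List Int)) : pvOnes es 0 = es := by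
  apply pvMapIdx_id
  intro j r _
  simp

lemma pvOnes_length (es : List (List Int)) (i : Nat) : (pvOnes es i).length = es.length := by
  simp [pvOnes]

lemma pvOnes_getD_self (es : List (List Int)) (i : Nat) (hi : i < es.length) :
    (pvOnes es i).getD i [] = es.getD i [] := by
  unfold pvOnes
  rw [pvGetD_mapIdx _ _ _ hi]
  simp

lemma pvOnes_succ_ne (es : List (List Int)) (i : Nat)
    (hz : (es.getD i []).getD 2 0 ≠ -1) : pvOnes es (i + 1) = pvOnes es i := by
  apply List.ext_getElem (by simp [pvOnes])
  intro j h1 h2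
  have hjl : j < es.length := by simpa [pvOnes] using h1
  unfold pvOnes
  rw [List.getElem_mapIdx, List.getElem_mapIdx]
  by_cases hj : j = i
  · subst hj
    have hget : es.getD j [] = es[j] := List.getD_eq_getElem es [] hjl
    rw [hget] at hz
    rw [if_neg (fun hc => hz hc.2), if_neg (fun hc => hz hc.2)]
  · have hiff : (j < i + 1 ∧ es[j].getD 2 0 = -1) ↔ (j < i ∧ es[j].getD 2 0 = -1) := by
      constructor
      · intro hc; exact ⟨by omega, hc.2⟩
      · intro hc; exact ⟨by omega, hc.2⟩
    rw [if_congr hiff rfl rfl]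

lemma pvOnes_succ_eq (es : List (List Int)) (i : Nat) (hi : i < es.length)
    (hz : (es.getD i []).getD 2 0 = -1) :
    pvOnes es (i + 1) = (pvOnes es i).set i ((es.getD i []).set 2 1) := by
  apply List.ext_getElem (by simp [pvOnes])
  intro j h1 h2
  have hjl : j < es.length := by simpa [pvOnes] using h1
  unfold pvOnes
  rw [List.getElem_mapIdx, List.getElem_set]
  by_cases hj : i = j
  · subst hj
    rw [if_pos rfl]
    have hget : es.getD i [] = es[i] := List.getD_eq_getElem es [] hi
    rw [hget] at hz
    rw [if_pos ⟨by omega, hz⟩, ← hget]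
  · rw [if_neg hj, List.getElem_mapIdx]
    have hiff : (j < i + 1 ∧ es[j].getD 2 0 = -1) ↔ (j < i ∧ es[j].getD 2 0 = -1) := by
      constructor
      · intro hc; exact ⟨by omega, hc.2⟩
      · intro hc; exact ⟨by omega, hc.2⟩
    rw [if_congr hiff rfl rfl]

lemma pvFillFrom_spec : ∀ (k : Nat) (es : List (List Int)) (j : Nat),
    es.length - j = k → pvFillFrom es j = pvFillSpec es j := by
  intro k
  induction k with
  | zero =>
    intro es j hk
    rw [pvFillFrom, dif_neg (by omega)]
    symm
    apply pvMapIdx_id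
    intro j' r hj'
    rw [if_neg (by intro hc; omega)]
  | succ m ih =>
    intro es j hk
    have hj : j < es.length := by omega
    rw [pvFillFrom, dif_pos hj]
    by_cases hz : (es.getD j []).getD 2 0 = -1
    · rw [if_pos hz]
      rw [ih _ (j + 1) (by simp; omega)]
      apply List.ext_getElem (by simp [pvFillSpec])
      intro j' h1 h2
      have hjl : j' < es.length := by simpa [pvFillSpec] using h2
      unfold pvFillSpec
      rw [List.getElem_mapIdx, List.getElem_mapIdx, List.getElem_set]
      by_cases hjj : j = j'
      · subst hjj
        have hget : es.getD j [] = es[j] := List.getD_eq_getElem es [] hj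
        rw [if_pos rfl, if_neg (by intro hc; omega), if_pos ⟨le_refl _, by rw [← hget]; exact hz⟩, ← hget]
      · rw [if_neg hjj]
        have hiff : (j + 1 ≤ j' ∧ es[j'].getD 2 0 = -1) ↔ (j ≤ j' ∧ es[j'].getD 2 0 = -1) := by
          constructor
          · intro hc; exact ⟨by omega, hc.2⟩
          · intro hc; exact ⟨by omega, hc.2⟩
        rw [if_congr hiff rfl rfl]
    · rw [if_neg hz]
      rw [ih _ (j + 1) (by omega)]
      apply List.ext_getElem (by simp [pvFillSpec])
      intro j' h1 h2
      have hjl : j' < es.length := by simpa [pvFillSpec] using h2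
      unfold pvFillSpec
      rw [List.getElem_mapIdx, List.getElem_mapIdx]
      by_cases hjj : j = j'
      · subst hjj
        have hget : es.getD j [] = es[j] := List.getD_eq_getElem es [] hj
        rw [hget] at hz
        rw [if_neg (by intro hc; exact hz hc.2), if_neg (by intro hc; exact hz hc.2)]
      · have hiff : (j + 1 ≤ j' ∧ es[j'].getD 2 0 = -1) ↔ (j ≤ j' ∧ es[j'].getD 2 0 = -1) := by
          constructor
          · intro hc; exact ⟨by omega, hc.2⟩
          · intro hc; exact ⟨by omega, hc.2⟩
        rw [if_congr hiff rfl rfl]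

lemma pvRow3 (e : List Int) (h : e.length = 3) :
    e = [e.getD 0 0, e.getD 1 0, e.getD 2 0] := by
  match e, h with
  | [a, b, c], _ => rfl

lemma pvFill0_outEq (es : List (List Int)) (hrows : ∀ e ∈ es, e.length = 3) :
    pvFillFrom es 0 = pvOutEq es := by
  rw [pvFillFrom_spec (es.length - 0) es 0 rfl]
  apply List.ext_getElem (by simp [pvFillSpec, pvOutEq])
  intro j h1 h2
  have hjl : j < es.length := by simpa [pvFillSpec] using h1
  unfold pvFillSpec pvOutEq
  rw [List.getElem_mapIdx, List.getElem_map]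
  have hlen3 : es[j].length = 3 := hrows es[j] (List.getElem_mem _)
  have hrow := pvRow3 es[j] hlen3
  by_cases hz : es[j].getD 2 0 = -1
  · rw [if_pos ⟨by omega, hz⟩, if_pos hz]
    conv_lhs => rw [hrow]
    rfl
  · rw [if_neg (by intro hc; exact hz hc.2), if_neg hz]
    conv_rhs => rw [← hrow]


lemma pvSuccess_eq (es : List (List Int)) (i : Nat) (tc : Int)
    (hrows : ∀ e ∈ es, e.length = 3)
    (hz : (es.getD i []).getD 2 0 = -1) :
    pvFillFrom ((pvOnes es i).set i ((es.getD i []).set 2 tc)) (i + 1) = pvOutB es i tc := by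
  rw [pvFillFrom_spec (((pvOnes es i).set i ((es.getD i []).set 2 tc)).length - (i + 1)) _ _ rfl]
  apply List.ext_getElem (by simp [pvFillSpec, pvOutB, pvOnes])
  intro j h1 h2
  have hjl : j < es.length := by simpa [pvFillSpec, pvOnes] using h1
  unfold pvFillSpec pvOutB
  rw [List.getElem_mapIdx, List.getElem_mapIdx, List.getElem_set]
  have hget : es.getD j [] = es[j] := List.getD_eq_getElem es [] hjl
  have hlen3 : es[j].length = 3 := hrows es[j] (List.getElem_mem _)
  have hrow := pvRow3 es[j] hlen3
  by_cases hj : i = j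
  · subst hj
    rw [if_pos rfl]
    rw [hget] at hz
    have hset : (es.getD i []).set 2 tc = [es[i].getD 0 0, es[i].getD 1 0, tc] := by
      rw [hget, hrow]; rfl
    rw [hset, if_neg (fun hc => absurd hc.1 (by omega)), if_pos hz, if_neg (by omega), if_pos rfl]
  · rw [if_neg hj]
    unfold pvOnes
    rw [List.getElem_mapIdx]
    by_cases hc : j < i ∧ es[j].getD 2 0 = -1
    · rw [if_pos hc]
      have hset1 : es[j].set 2 1 = [es[j].getD 0 0, es[j].getD 1 0, 1] := by
        rw [hrow]; rfl
      rw [hset1, if_neg (fun hcc => absurd hcc.1 (by omega)), if_pos hc.2, if_pos hc.1]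
    · rw [if_neg hc]
      by_cases hz2 : es[j].getD 2 0 = -1
      · have hgt : i + 1 ≤ j := by
          rcases Nat.lt_trichotomy j i with h | h | h
          · exact absurd ⟨h, hz2⟩ hc
          · exact absurd h.symm hj
          · omega
        rw [if_pos ⟨hgt, hz2⟩, if_pos hz2, if_neg (by omega), if_neg (by omega)]
        rw [hrow]; rfl
      · rw [if_neg (by intro hcc; exact hz2 hcc.2), if_neg hz2]
        conv_rhs => rw [← hrow]

lemma pvMain_eq (nn : Nat) (s t tgt : Int)
    (hs0 : 0 ≤ s) (hs : s.toNat < nn) (ht : t.toNat < nn) :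
    ∀ (k : Nat) (es : List (List Int)) (i : Nat) (g : List (List (Int × Int))),
      es.length - i = k → (∀ e ∈ es, pvRowOK nn e) → pvGoodG nn g →
      pvMainA g (pvOnes es i) i nn s t tgt = pvMainB g es i nn s t tgt := by
  intro k
  induction k with
  | zero =>
    intro es i g hk hrows hg
    rw [pvMainA, pvMainB, dif_neg (by rw [pvOnes_length]; omega), dif_neg (by omega)]
  | succ m ih =>
    intro es i g hk hrows hg
    have hi : i < es.length := by omega
    have hself : (pvOnes es i).getD i [] = es.getD i [] := pvOnes_getD_self es i hi
    have hrok : pvRowOK nn (es.getD i []) := by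
      rw [List.getD_eq_getElem es [] hi]
      exact hrows es[i] (List.getElem_mem _)
    rw [pvMainA, pvMainB, dif_pos (by rw [pvOnes_length]; omega), dif_pos hi]
    simp only [hself]
    by_cases hz : (es.getD i []).getD 2 0 = -1
    · rw [if_neg (by simpa using hz), if_pos hz]
      have hg1 : pvGoodG nn (pvAppendAdj (pvAppendAdj g ((es.getD i []).getD 0 0)
          ((es.getD i []).getD 1 0, 1)) ((es.getD i []).getD 1 0) ((es.getD i []).getD 0 0, 1)) := by
        obtain ⟨_, r1, r2, r3, r4, _⟩ := hrok
        exact pvAppendAdj_good nn _ _ _ (pvAppendAdj_good nn _ _ _ hg r3 r4 (by omega)) r1 r2 (by omega)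
      have hcur := pvDijkstra_eq nn _ s t hg1 hs0 hs ht
      rw [hcur]
      by_cases hle : pvSpdB (pvAppendAdj (pvAppendAdj g ((es.getD i []).getD 0 0)
          ((es.getD i []).getD 1 0, 1)) ((es.getD i []).getD 1 0) ((es.getD i []).getD 0 0, 1)) nn s t ≤ tgt
      · rw [if_pos hle, if_pos hle]
        have hgetset : ((pvOnes es i).set i ((es.getD i []).set 2 1)).getD i [] = (es.getD i []).set 2 1 := by
          rw [pvGetD_set, if_pos ⟨rfl, by rw [pvOnes_length]; omega⟩]
        rw [hgetset, List.set_set, List.set_set]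
        exact pvSuccess_eq es i _ (fun e he => (hrows e he).1) hz
      · rw [if_neg hle, if_neg hle]
        rw [← pvOnes_succ_eq es i hi hz]
        exact ih es (i + 1) _ (by omega) hrows hg1
    · rw [if_pos (by simpa using hz), if_neg hz]
      rw [← pvOnes_succ_ne es i hz]
      exact ih es (i + 1) g (by omega) hrows hg

-- ===== VERDICT (by name: the statement is the Claim_ definition above) =====
theorem modifiedGraphEdges_spec : Claim_equal_modifiedGraphEdges := by
  intro n edges source destination target _ hpre
  obtain ⟨hs0, hsn, ht0, htn, hrows0⟩ := hpre
  have hn0 : 0 < n := by omega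
  have hcast : ((n.toNat : Nat) : Int) = n := Int.toNat_of_nonneg (by omega)
  have hrows : ∀ e ∈ edges, pvRowOK n.toNat e := by
    intro e he
    obtain ⟨r0, r1, r2, r3, r4, r5⟩ := hrows0 e he
    exact ⟨r0, r1, by rw [hcast]; exact r2, r3, by rw [hcast]; exact r4, r5⟩
  have hg : pvGoodG n.toNat (pvBuild n.toNat edges) := by
    unfold pvBuild
    exact pvBuild_good n.toNat edges _ hrows (pvGoodG_replicate n.toNat)
  have hs : source.toNat < n.toNat := by omega
  have ht : destination.toNat < n.toNat := by omega
  show modifiedGraphEdges n edges source destination target =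
    modifiedGraphEdges_alt n edges source destination target
  unfold modifiedGraphEdges modifiedGraphEdges_alt
  show (if pvDijkstraA (pvBuild n.toNat edges) n.toNat source destination < target then []
      else if pvDijkstraA (pvBuild n.toNat edges) n.toNat source destination = target then pvFillFrom edges 0
      else pvMainA (pvBuild n.toNat edges) edges 0 n.toNat source destination target) =
    (if pvSpdB (pvBuild n.toNat edges) n.toNat source destination < target then []
      else if pvSpdB (pvBuild n.toNat edges) n.toNat source destination = target then pvOutEq edges
      else pvMainB (pvBuild n.toNat edges) edges 0 n.toNat source destination target)
  have hcur := pvDijkstra_eq n.toNat (pvBuild n.toNat edges) source destination hg hs0 hs ht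
  rw [hcur]
  by_cases h1 : pvSpdB (pvBuild n.toNat edges) n.toNat source destination < target
  · rw [if_pos h1, if_pos h1]
  · rw [if_neg h1, if_neg h1]
    by_cases h2 : pvSpdB (pvBuild n.toNat edges) n.toNat source destination = target
    · rw [if_pos h2, if_pos h2]
      exact pvFill0_outEq edges (fun e he => (hrows e he).1)
    · rw [if_neg h2, if_neg h2]
      have hmain := pvMain_eq n.toNat source destination target hs0 hs ht
        (edges.length - 0) edges 0 (pvBuild n.toNat edges) rfl hrows hg
      rw [pvOnes_zero edges] at hmain
      exact hmain
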